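-- pv_equiv track=rewrite | github.com/wcgan7/feature-prd-runner | src/feature_prd_runner/parallel_integration.py | group_tasks_by_phase
-- ===== SOURCE A (Python) =====
-- from typing import Any, Optional
--
-- def group_tasks_by_phase(tasks: list[dict[str, Any]]) -> dict[str, list[dict[str, Any]]]:
--     """Group tasks by their phase_id.
--
--     Args:
--         tasks: List of all tasks.
--
--     Returns:
--         Dictionary mapping phase_id to list of tasks.
--     """
--     phase_tasks: dict[str, list[dict[str, Any]]] = {}
--
--     for task in tasks:
--         phase_id = task.get("phase_id")
--         if not phase_id:
--             # Tasks without phase_id (like 'plan' task) are not parallelizable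
--             continue
--
--         if phase_id not in phase_tasks:
--             phase_tasks[phase_id] = []
--
--         phase_tasks[phase_id].append(task)
--
--     return phase_tasks
-- ===== SOURCE B (Python) =====
-- def group_tasks_by_phase(tasks):
--     """Group tasks by their phase_id (two-pass: collect phase ids, then filter per id)."""
--     keys = []
--     for task in tasks:
--         pid = task.get("phase_id")
--         if pid and pid not in keys:
--             keys.append(pid)
--     return {k: [t for t in tasks if t.get("phase_id") == k] for k in keys}
-- ===== Notes on version B (the rewrite author's own statement) =====
-- stated objective: alternative
-- what changed: Replaces the single-pass incremental dict build (setdefault-style insert+append per task) with a two-pass scheme: one pass collects the distinct truthy phase_ids in first-occurrence order, then a dict comprehension builds each group by filtering the whole task list per phase_id.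
import Mathlib
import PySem

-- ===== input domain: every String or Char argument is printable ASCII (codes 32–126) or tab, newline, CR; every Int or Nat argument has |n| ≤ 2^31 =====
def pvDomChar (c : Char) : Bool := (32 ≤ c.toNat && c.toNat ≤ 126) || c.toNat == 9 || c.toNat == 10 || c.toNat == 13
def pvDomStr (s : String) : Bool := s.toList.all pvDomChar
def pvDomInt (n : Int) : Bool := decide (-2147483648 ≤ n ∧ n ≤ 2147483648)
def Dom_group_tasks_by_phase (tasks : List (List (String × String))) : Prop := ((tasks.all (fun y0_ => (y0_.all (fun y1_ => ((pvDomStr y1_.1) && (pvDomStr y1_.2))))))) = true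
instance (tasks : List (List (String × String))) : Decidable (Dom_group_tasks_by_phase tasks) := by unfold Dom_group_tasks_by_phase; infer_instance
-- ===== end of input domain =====

-- B replaces A's single-pass incremental dict build with a two-pass scheme (collect distinct
-- phase ids, then filter the task list per id); alternative decomposition, same results.


-- ===== PORT A =====
-- literal port of A: fold over tasks building the dict incrementally
-- ('if not phase_id' on a str-or-None value = the lookup is none or the empty string)
def group_tasks_by_phase (tasks : List (List (String × String))) : List (String × List (List (String × String))) :=
  let phase_tasks : PySem.Dict String (List (List (String × String))) :=
    tasks.foldl (fun phase_tasks task =>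
      match (PySem.Dict.mk task).get? "phase_id" with
      | none => phase_tasks
      | some phase_id =>
        if phase_id = "" then phase_tasks
        else
          let pt := if phase_tasks.contains phase_id then phase_tasks
                    else phase_tasks.insert phase_id []
          pt.modify phase_id [] (fun l => l ++ [task])) PySem.Dict.empty
  phase_tasks.items

-- ===== PORT B =====
-- literal port of B: first pass collects distinct truthy phase ids (a plain list, as in Source B),
-- second pass filters the task list once per id
def group_tasks_by_phase_alt (tasks : List (List (String × String))) : List (String × List (List (String × String))) :=
  let keys : List String :=
    tasks.foldl (fun keys task =>
      match (PySem.Dict.mk task).get? "phase_id" with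
      | none => keys
      | some pid => if pid != "" && !keys.contains pid then keys ++ [pid] else keys) []
  keys.map (fun k => (k, tasks.filter (fun task => (PySem.Dict.mk task).get? "phase_id" == some k)))

-- ===== PRECONDITION & SPEC =====
def Spec_group_tasks_by_phase (tasks : List (List (String × String))) (out : List (String × List (List (String × String)))) : Prop := out = group_tasks_by_phase_alt tasks
instance (tasks : List (List (String × String))) (out : List (String × List (List (String × String)))) : Decidable (Spec_group_tasks_by_phase tasks out) := by unfold Spec_group_tasks_by_phase; infer_instance

-- ===== CLAIM (what is proved, stated in full; the proofs are below) =====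
def Claim_equal_group_tasks_by_phase : Prop := ∀ (tasks : List (List (String × String))), Dom_group_tasks_by_phase tasks → Spec_group_tasks_by_phase tasks (group_tasks_by_phase tasks)

-- ===== LEMMAS AND PROOFS =====

-- the (phase_id, task) pairs both programs effectively group over
def pvPairs (tasks : List (List (String × String))) : List (String × List (String × String)) :=
  tasks.filterMap (fun t =>
    match (PySem.Dict.mk t).get? "phase_id" with
    | none => none
    | some pid => if pid = "" then none else some (pid, t))

theorem pvPairs_fst_ne_empty (tasks : List (List (String × String))) :
    ∀ k ∈ (pvPairs tasks).map (·.1), k ≠ "" := by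
  intro k hk
  simp only [pvPairs, List.mem_map, List.mem_filterMap] at hk
  rcases hk with ⟨p, ⟨t, _, ht⟩, rfl⟩
  cases h : (PySem.Dict.mk t).get? "phase_id" with
  | none => simp [h] at ht
  | some pid =>
    simp only [h] at ht
    by_cases hpid : pid = "" <;> simp [hpid] at ht
    cases ht; exact hpid

theorem foldlA_eq_pairs (tasks : List (List (String × String)))
    (d : PySem.Dict String (List (List (String × String)))) :
    tasks.foldl (fun phase_tasks task =>
      match (PySem.Dict.mk task).get? "phase_id" with
      | none => phase_tasks
      | some phase_id =>
        if phase_id = "" then phase_tasks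
        else
          let pt := if phase_tasks.contains phase_id then phase_tasks
                    else phase_tasks.insert phase_id []
          pt.modify phase_id [] (fun l => l ++ [task])) d
    = (pvPairs tasks).foldl (fun d p => d.modify p.1 [] (fun l => l ++ [p.2])) d := by
  induction tasks generalizing d with
  | nil => rfl
  | cons t ts ih =>
    simp only [List.foldl_cons, pvPairs, List.filterMap_cons]
    cases h : (PySem.Dict.mk t).get? "phase_id" with
    | none => simpa [h, pvPairs] using ih d
    | some pid =>
      by_cases hpid : pid = ""
      · simpa [h, hpid, pvPairs] using ih d
      · simp only [if_neg hpid, List.foldl_cons]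
        have hstep : (if d.contains pid then d else d.insert pid []).modify pid []
              (fun l => l ++ [t]) = d.modify pid [] (fun l => l ++ [t]) := by
          by_cases hc : d.contains pid
          · simp [hc]
          · simp only [hc, Bool.false_eq_true, if_false]
            show (d.insert pid []).insert pid (((d.insert pid []).getD pid []) ++ [t])
               = d.insert pid ((d.getD pid []) ++ [t])
            rw [PySem.Dict.getD_insert_self, PySem.Dict.insert_insert_self,
                PySem.Dict.getD_of_not_contains d [] (by simpa using hc)]
        rw [hstep]
        simpa [pvPairs] using ih (d.modify pid [] (fun l => l ++ [t]))

theorem foldlB_eq_pairs (tasks : List (List (String × String))) (ks : List String) :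
    tasks.foldl (fun keys task =>
      match (PySem.Dict.mk task).get? "phase_id" with
      | none => keys
      | some pid => if pid != "" && !keys.contains pid then keys ++ [pid] else keys) ks
    = (pvPairs tasks).foldl (fun s p => PySem.Set.add s p.1) ks := by
  induction tasks generalizing ks with
  | nil => rfl
  | cons t ts ih =>
    simp only [List.foldl_cons, pvPairs, List.filterMap_cons]
    cases h : (PySem.Dict.mk t).get? "phase_id" with
    | none => simpa [h, pvPairs] using ih ks
    | some pid =>
      by_cases hpid : pid = ""
      · simpa [h, hpid, pvPairs] using ih ks
      · have : (if pid != "" && !ks.contains pid then ks ++ [pid] else ks)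
             = PySem.Set.add ks pid := by
          simp only [PySem.Set.add, PySem.Set.contains]
          by_cases hc : ks.contains pid <;> simp [hc, hpid]

        simp only [if_neg hpid, List.foldl_cons, this]
        simpa [pvPairs] using ih (PySem.Set.add ks pid)

theorem filterB_eq_pairs (k : String) (hk : k ≠ "") (tasks : List (List (String × String))) :
    tasks.filter (fun task => (PySem.Dict.mk task).get? "phase_id" == some k)
    = ((pvPairs tasks).filter (fun p => p.1 == k)).map (·.2) := by
  induction tasks with
  | nil => rfl
  | cons t ts ih =>
    cases h : (PySem.Dict.mk t).get? "phase_id" with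
    | none =>
      have hp : pvPairs (t :: ts) = pvPairs ts := by simp [pvPairs, h]
      have hc : ((PySem.Dict.mk t).get? "phase_id" == some k) = false := by simp [h]
      simp [hc, hp, ih]
    | some pid =>
      by_cases hpid : pid = ""
      · have hp : pvPairs (t :: ts) = pvPairs ts := by simp [pvPairs, h, hpid]
        have hc : ((PySem.Dict.mk t).get? "phase_id" == some k) = false := by
          rw [h]; subst hpid; simpa using (Ne.symm hk)
        simp [hc, hp, ih]
      · have hp : pvPairs (t :: ts) = (pid, t) :: pvPairs ts := by simp [pvPairs, h, hpid]
        by_cases hpk : pid = k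
        · subst hpk
          have hc : ((PySem.Dict.mk t).get? "phase_id" == some pid) = true := by simp [h]
          simp [hc, hp, ih]
        · have hc : ((PySem.Dict.mk t).get? "phase_id" == some k) = false := by simp [h, hpk]
          simp [hc, hp, hpk, ih]

-- ===== VERDICT (by name: the statement is the Claim_ definition above) =====
theorem group_tasks_by_phase_spec : Claim_equal_group_tasks_by_phase := by
  intro tasks _
  show group_tasks_by_phase tasks = group_tasks_by_phase_alt tasks
  unfold group_tasks_by_phase group_tasks_by_phase_alt
  rw [foldlA_eq_pairs, foldlB_eq_pairs]
  set ps := pvPairs tasks with hps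
  have hkeysA : ((ps.foldl (fun d p => d.modify p.1 [] (fun l => l ++ [p.2]))
        PySem.Dict.empty).keys : List String)
      = PySem.Set.update PySem.Dict.empty.keys (ps.map (·.1)) :=
    PySem.Dict.keys_foldl_modify_key ps (·.1) [] (fun _ p l => l ++ [p.2]) _
  have hnd : (ps.foldl (fun d p => d.modify p.1 [] (fun l => l ++ [p.2]))
        PySem.Dict.empty).keys.Nodup :=
    PySem.Dict.nodup_keys_foldl_modify_key ps (·.1) [] (fun _ p l => l ++ [p.2]) _
      PySem.Dict.nodup_keys_empty
  have hkeysB : ps.foldl (fun s p => PySem.Set.add s p.1) ([] : List String)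
      = PySem.Set.update [] (ps.map (·.1)) :=
    (PySem.Set.update_map_eq_foldl_add ps (·.1) []).symm
  rw [PySem.Dict.items_eq_map_keys _ hnd [], hkeysA, hkeysB, PySem.Dict.keys_empty]
  apply List.map_congr_left
  intro k hkmem
  have hk : k ≠ "" := by
    apply pvPairs_fst_ne_empty tasks
    rw [← hps]
    have := hkmem
    rw [PySem.Set.update_nil_left] at this
    exact (PySem.Set.mem_ofList _ _).mp this
  have hg : (ps.foldl (fun d p => d.modify p.1 [] (fun l => l ++ [p.2]))
        PySem.Dict.empty).getD k []
      = (ps.filter (fun p => p.1 == k)).map (·.2) := by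
    simpa using PySem.Dict.getD_foldl_modify_append ps PySem.Dict.empty k
  rw [hg, ← filterB_eq_pairs k hk tasks]
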